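-- pv_equiv track=rewrite | github.com/WBChe/memory_test_model_host | make_pattern/make_pattern.py | generate_sequence00
-- ===== SOURCE A (Python) =====
-- def generate_sequence00(start, end):
--     increments = [511, 1]
--     current_index = 0
--
--     current = start
--
--     while current <= end:
--         yield current
--         current += increments[current_index]
--         current_index = (current_index + 1) % len(increments)
-- ===== SOURCE B (Python) =====
-- def generate_sequence00(start, end):
--     # Closed form: the i-th emitted value is start + 512*(i//2) + 511*(i%2);
--     # the total count follows from divmod(end - start, 512).
--     span = end - start
--     if span < 0:
--         total = 0
--     else:
--         q, r = divmod(span, 512)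
--         total = 2 * q + (2 if r >= 511 else 1)
--     for i in range(total):
--         yield start + 512 * (i // 2) + 511 * (i % 2)
-- ===== Notes on version B (the rewrite author's own statement) =====
-- stated objective: alternative
-- what changed: Replaces the stateful while-loop with a closed form: the number of emitted values is computed once from divmod(end-start, 512) and the i-th value is start + 512*(i//2) + 511*(i%2) over range(total).
import Mathlib
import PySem

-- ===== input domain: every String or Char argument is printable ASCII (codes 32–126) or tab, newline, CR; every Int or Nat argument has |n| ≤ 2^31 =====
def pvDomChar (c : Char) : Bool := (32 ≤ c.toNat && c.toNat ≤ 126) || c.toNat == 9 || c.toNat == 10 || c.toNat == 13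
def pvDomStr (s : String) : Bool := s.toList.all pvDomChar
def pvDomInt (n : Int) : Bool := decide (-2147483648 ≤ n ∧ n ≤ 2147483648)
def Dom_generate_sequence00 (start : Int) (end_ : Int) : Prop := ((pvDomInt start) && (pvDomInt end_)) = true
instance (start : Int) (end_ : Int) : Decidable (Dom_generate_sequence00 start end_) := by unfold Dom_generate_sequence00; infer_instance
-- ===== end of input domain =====

-- B: alternative — replaces A's stateful while-loop with a closed form: the count of emitted
-- values is computed from divmod(end-start, 512) and the i-th value is start + 512*(i//2) + 511*(i%2).


-- ===== PORT A =====
-- while-loop of A: state (current, current_index); increments = [511, 1]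
def genA00 (end_ : Int) (current : Int) (idx : Nat) : List Int :=
  if _h : current ≤ end_ then
    current :: genA00 end_ (current + (if idx = 0 then 511 else 1)) ((idx + 1) % 2)
  else []
termination_by (end_ + 1 - current).toNat
decreasing_by
  split <;> omega

def generate_sequence00 (start : Int) (end_ : Int) : List Int :=
  genA00 end_ start 0

-- ===== PORT B =====
-- Source B: total from divmod(end-start, 512), then the indexed closed form over range(total)
def generate_sequence00_alt (start : Int) (end_ : Int) : List Int :=
  let span := end_ - start
  let total : Int :=
    if span < 0 then 0
    else
      let q := PySem.Int.floordiv span 512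
      let r := PySem.Int.mod span 512
      2 * q + (if r ≥ 511 then 2 else 1)
  (PySem.List.pyRange 0 total 1).map
    (fun i => start + 512 * PySem.Int.floordiv i 2 + 511 * PySem.Int.mod i 2)

-- ===== PRECONDITION & SPEC =====
def Spec_generate_sequence00 (start : Int) (end_ : Int) (out : List Int) : Prop := out = generate_sequence00_alt start end_
instance (start : Int) (end_ : Int) (out : List Int) : Decidable (Spec_generate_sequence00 start end_ out) := by unfold Spec_generate_sequence00; infer_instance

-- ===== CLAIM (what is proved, stated in full; the proofs are below) =====
def Claim_equal_generate_sequence00 : Prop := ∀ (start : Int) (end_ : Int), Dom_generate_sequence00 start end_ → Spec_generate_sequence00 start end_ (generate_sequence00 start end_)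

-- ===== LEMMAS AND PROOFS =====

-- Nat-indexed closed form for one emitted value
def pvIdxVal (c : Int) (k : Nat) : Int := c + 512 * (k / 2 : Nat) + 511 * (k % 2 : Nat)

-- total count as a Nat, as a function of the span
def pvTotal (span : Int) : Nat :=
  if span < 0 then 0 else (2 * (span / 512) + (if span % 512 ≥ 511 then 2 else 1)).toNat

lemma pvIdxVal_zero (c : Int) : pvIdxVal c 0 = c := by simp [pvIdxVal]

lemma pvIdxVal_one (c : Int) : pvIdxVal c 1 = c + 511 := by simp [pvIdxVal]

lemma pvIdxVal_shift (c : Int) (k : Nat) : pvIdxVal c (k + 2) = pvIdxVal (c + 512) k := by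
  unfold pvIdxVal
  have h1 : (k + 2) / 2 = k / 2 + 1 := by omega
  have h2 : (k + 2) % 2 = k % 2 := by omega
  rw [h1, h2]
  push_cast
  ring

lemma pvTotal_small (span : Int) (h0 : 0 ≤ span) (h1 : span < 511) : pvTotal span = 1 := by
  unfold pvTotal
  have hq : span / 512 = 0 := by omega
  have hr : ¬ span % 512 ≥ 511 := by omega
  have h3 : ¬ span < 0 := by omega
  simp [hq, hr, h3]

lemma pvTotal_shift (span : Int) (h : 511 ≤ span) : pvTotal span = pvTotal (span - 512) + 2 := by
  unfold pvTotal
  by_cases h2 : span - 512 < 0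
  · -- 511 ≤ span < 512
    have hq : span / 512 = 0 := by omega
    have hr : span % 512 ≥ 511 := by omega
    have h3 : ¬ span < 0 := by omega
    simp [hq, hr, h2, h3]
  · have hq : span / 512 = (span - 512) / 512 + 1 := by omega
    have hr : span % 512 = (span - 512) % 512 := by omega
    have h3 : ¬ span < 0 := by omega
    rw [hq, hr]
    simp only [h3, h2, if_neg, not_false_iff]
    have hge : 0 ≤ (span - 512) / 512 := Int.ediv_nonneg (by omega) (by omega)
    split <;> omega

-- the closed-form list emitted from current value c with remaining span
def pvClosed (c : Int) (span : Int) : List Int := (List.range (pvTotal span)).map (pvIdxVal c)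

lemma pvClosed_shift (c span : Int) (h : 511 ≤ span) :
    pvClosed c span = c :: (c + 511) :: pvClosed (c + 512) (span - 512) := by
  unfold pvClosed
  rw [pvTotal_shift span h]
  rw [show pvTotal (span - 512) + 2 = (pvTotal (span - 512) + 1) + 1 from rfl]
  rw [List.range_succ_eq_map, List.range_succ_eq_map]
  simp [List.map_map, Function.comp, pvIdxVal_zero, pvIdxVal_one]
  intro k _
  have hk : k + 1 + 1 = k + 2 := by omega
  rw [hk, pvIdxVal_shift]

lemma genA00_eq_closed (end_ : Int) :
    ∀ (n : Nat) (c : Int), (end_ + 1 - c).toNat ≤ n → genA00 end_ c 0 = pvClosed c (end_ - c) := by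
  intro n
  induction n with
  | zero =>
    intro c hc
    have hgt : ¬ c ≤ end_ := by omega
    have hneg : end_ - c < 0 := by omega
    rw [genA00]
    simp [hgt, pvClosed, pvTotal, hneg]
  | succ n ih =>
    intro c hc
    by_cases h1 : c ≤ end_
    · rw [genA00]
      simp only [h1, dif_pos]
      norm_num
      by_cases h2 : c + 511 ≤ end_
      · rw [pvClosed_shift c (end_ - c) (by omega)]
        have heq : end_ - c - 512 = end_ - (c + 512) := by ring
        rw [heq]
        have hih := ih (c + 512) (by omega)
        rw [genA00]
        simp only [h2, dif_pos]
        norm_num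
        rw [show c + 511 + 1 = c + 512 by ring]
        exact hih
      · rw [genA00]
        have h2' : ¬ (c + 511 ≤ end_) := h2
        simp only [h2', dif_neg, not_false_iff]
        rw [pvClosed]
        rw [pvTotal_small (end_ - c) (by omega) (by omega)]
        simp [pvIdxVal_zero]
    · rw [genA00]
      have hneg : end_ - c < 0 := by omega
      simp [h1, pvClosed, pvTotal, hneg]

lemma alt_eq_closed (start end_ : Int) :
    generate_sequence00_alt start end_ = pvClosed start (end_ - start) := by
  unfold generate_sequence00_alt pvClosed
  dsimp only
  have hb : (0:Int) < 512 := by norm_num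
  rw [PySem.Int.floordiv_eq_ediv_of_pos hb, PySem.Int.mod_eq_emod_of_pos hb]
  set span := end_ - start with hspan
  set T : Int := if span < 0 then 0 else 2 * (span / 512) + (if span % 512 ≥ 511 then 2 else 1) with hT
  have hT0 : 0 ≤ T := by
    rw [hT]
    by_cases h : span < 0
    · simp [h]
    · have hq : 0 ≤ span / 512 := Int.ediv_nonneg (by omega) (by omega)
      simp only [h, reduceIte]
      split <;> omega
  have hTn : T.toNat = pvTotal span := by
    rw [hT]
    unfold pvTotal
    by_cases h : span < 0 <;> simp [h]
  rw [PySem.List.pyRange_one]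
  simp only [List.map_map, Int.sub_zero, hTn]
  apply List.map_congr_left
  intro k _
  simp only [Function.comp]
  have h2 : PySem.Int.floordiv ((0:Int) + (k:Int)) 2 = ((k / 2 : Nat) : Int) := by
    simpa using PySem.Int.floordiv_natCast k 2
  have h3 : PySem.Int.mod ((0:Int) + (k:Int)) 2 = ((k % 2 : Nat) : Int) := by
    simpa using PySem.Int.mod_natCast k 2
  rw [h2, h3]
  rfl

-- ===== VERDICT (by name: the statement is the Claim_ definition above) =====
theorem generate_sequence00_spec : Claim_equal_generate_sequence00 := by
  intro start end_ _hd
  unfold Spec_generate_sequence00 generate_sequence00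
  rw [alt_eq_closed]
  exact genA00_eq_closed end_ (end_ + 1 - start).toNat start le_rfl
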